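-- pv_equiv track=rewrite | github.com/uclnlp/jack | jtr/tasks/xqa/util.py | unique_words_with_chars
-- ===== SOURCE A (Python) =====
-- def unique_words_with_chars(q_tokenized, s_tokenized, char_vocab, indices=None, char_limit=20):
--     indices = indices or range(len(q_tokenized))
--
--     unique_words_set = dict()
--     unique_words = list()
--     unique_word_lengths = list()
--     question2unique = list()
--     support2unique = list()
--
--     for j in indices:
--         q2u = list()
--         for w in q_tokenized[j]:
--             w = w[:char_limit]
--             if w not in unique_words_set:
--                 unique_word_lengths.append(len(w))
--                 unique_words.append([char_vocab.get(c, 0) for c in w])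
--                 unique_words_set[w] = len(unique_words_set)
--             q2u.append(unique_words_set[w])
--         question2unique.append(q2u)
--         s2u = list()
--         for w in s_tokenized[j]:
--             w = w[:char_limit]
--             if w not in unique_words_set:
--                 unique_word_lengths.append(len(w))
--                 unique_words.append([char_vocab.get(c, 0) for c in w])
--                 unique_words_set[w] = len(unique_words_set)
--             s2u.append(unique_words_set[w])
--         support2unique.append(s2u)
--
--     return unique_words, unique_word_lengths, question2unique, support2unique
-- ===== SOURCE B (Python) =====
-- def unique_words_with_chars(q_tokenized, s_tokenized, char_vocab, indices=None, char_limit=20):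
--     indices = list(indices or range(len(q_tokenized)))
--
--     unique_words_set = dict()
--     unique_words = list()
--     unique_word_lengths = list()
--
--     # Phase 1: build the unique-word table only (q row before s row, index by index).
--     for j in indices:
--         for w in q_tokenized[j]:
--             w = w[:char_limit]
--             if w not in unique_words_set:
--                 unique_word_lengths.append(len(w))
--                 unique_words.append([char_vocab.get(c, 0) for c in w])
--                 unique_words_set[w] = len(unique_words_set)
--         for w in s_tokenized[j]:
--             w = w[:char_limit]
--             if w not in unique_words_set:
--                 unique_word_lengths.append(len(w))
--                 unique_words.append([char_vocab.get(c, 0) for c in w])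
--                 unique_words_set[w] = len(unique_words_set)
--
--     # Phase 2: token maps via the now-complete table.
--     question2unique = [[unique_words_set[w[:char_limit]] for w in q_tokenized[j]] for j in indices]
--     support2unique = [[unique_words_set[w[:char_limit]] for w in s_tokenized[j]] for j in indices]
--
--     return unique_words, unique_word_lengths, question2unique, support2unique
-- ===== Notes on version B (the rewrite author's own statement) =====
-- stated objective: alternative
-- what changed: A interleaves vocabulary building with emitting the token->index maps in one pass; B first builds the complete unique-word table in a vocabulary-only pass, then produces question2unique/support2unique by pure lookups (comprehensions) over the finished table.
import Mathlib
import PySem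

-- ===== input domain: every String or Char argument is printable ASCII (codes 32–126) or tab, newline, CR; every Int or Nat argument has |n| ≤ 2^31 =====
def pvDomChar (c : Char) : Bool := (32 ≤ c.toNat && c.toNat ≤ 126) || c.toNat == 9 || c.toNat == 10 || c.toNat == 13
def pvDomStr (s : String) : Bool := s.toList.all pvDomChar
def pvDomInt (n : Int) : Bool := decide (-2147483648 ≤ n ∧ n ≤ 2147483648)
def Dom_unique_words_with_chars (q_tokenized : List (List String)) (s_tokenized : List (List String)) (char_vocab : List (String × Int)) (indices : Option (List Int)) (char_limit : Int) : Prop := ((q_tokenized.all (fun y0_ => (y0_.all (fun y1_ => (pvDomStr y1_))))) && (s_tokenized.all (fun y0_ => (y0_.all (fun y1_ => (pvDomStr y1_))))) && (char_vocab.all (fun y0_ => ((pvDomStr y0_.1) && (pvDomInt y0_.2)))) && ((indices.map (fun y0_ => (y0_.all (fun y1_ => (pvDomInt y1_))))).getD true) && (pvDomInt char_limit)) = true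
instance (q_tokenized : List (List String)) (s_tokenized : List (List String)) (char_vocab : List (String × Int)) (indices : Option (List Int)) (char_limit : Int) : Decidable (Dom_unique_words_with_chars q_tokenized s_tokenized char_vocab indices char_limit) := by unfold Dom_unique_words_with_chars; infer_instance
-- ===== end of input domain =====

-- B builds the unique-word table in a vocabulary-only pass and then emits the token maps by
-- lookups in the finished table; A interleaves both in a single pass. Return values proved equal.

-- `indices = indices or range(len(q_tokenized))` (empty list is falsy, like None)
def pvEff (q_tokenized : List (List String)) (indices : Option (List Int)) : List Int :=
  match indices with
  | none => PySem.List.pyRange 0 (q_tokenized.length : Int) 1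
  | some [] => PySem.List.pyRange 0 (q_tokenized.length : Int) 1
  | some l => l

-- w[:char_limit], on code points
def pvTrunc (char_limit : Int) (w : String) : List Char :=
  PySem.List.slice w.toList none (some char_limit)

-- [char_vocab.get(c, 0) for c in w]  (w already truncated)
def pvEncode (char_vocab : List (String × Int)) (w : List Char) : List Int :=
  w.map (fun c => (PySem.Dict.mk char_vocab).getD (String.ofList [c]) 0)

-- the shared body of `if w not in unique_words_set: …` (identical text in A and B)
def pvAdd (char_vocab : List (String × Int)) (char_limit : Int)
    (st : PySem.Dict (List Char) Int × List (List Int) × List Int) (w0 : String) :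
    PySem.Dict (List Char) Int × List (List Int) × List Int :=
  let w := pvTrunc char_limit w0
  if st.1.contains w then st
  else (st.1.insert w (st.1.size : Int),
        st.2.1 ++ [pvEncode char_vocab w],
        st.2.2 ++ [(w.length : Int)])

-- ===== PORT A =====
-- A's per-index step: the q row then the s row, each emitting its map while inserting
def pvStepA (char_vocab : List (String × Int)) (char_limit : Int)
    (q_tokenized s_tokenized : List (List String))
    (acc : (PySem.Dict (List Char) Int × List (List Int) × List Int) × List (List Int) × List (List Int))
    (j : Int) :
    (PySem.Dict (List Char) Int × List (List Int) × List Int) × List (List Int) × List (List Int) :=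
  let r1 := (PySem.List.pyGetD q_tokenized j []).foldl
      (fun p w => let st' := pvAdd char_vocab char_limit p.1 w
                  (st', p.2 ++ [st'.1.getD (pvTrunc char_limit w) 0])) (acc.1, [])
  let r2 := (PySem.List.pyGetD s_tokenized j []).foldl
      (fun p w => let st' := pvAdd char_vocab char_limit p.1 w
                  (st', p.2 ++ [st'.1.getD (pvTrunc char_limit w) 0])) (r1.1, [])
  (r2.1, acc.2.1 ++ [r1.2], acc.2.2 ++ [r2.2])

def unique_words_with_chars (q_tokenized : List (List String)) (s_tokenized : List (List String)) (char_vocab : List (String × Int)) (indices : Option (List Int)) (char_limit : Int) : List (List Int) × List Int × List (List Int) × List (List Int) :=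
  let idxs := pvEff q_tokenized indices
  let fin := idxs.foldl (pvStepA char_vocab char_limit q_tokenized s_tokenized)
      ((PySem.Dict.empty, [], []), [], [])
  (fin.1.2.1, fin.1.2.2, fin.2.1, fin.2.2)

-- ===== PORT B =====
-- B's phase-1 per-index step: only the table is built (q row before s row)
def pvStepB (char_vocab : List (String × Int)) (char_limit : Int)
    (q_tokenized s_tokenized : List (List String))
    (st : PySem.Dict (List Char) Int × List (List Int) × List Int) (j : Int) :
    PySem.Dict (List Char) Int × List (List Int) × List Int :=
  (PySem.List.pyGetD s_tokenized j []).foldl (pvAdd char_vocab char_limit)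
    ((PySem.List.pyGetD q_tokenized j []).foldl (pvAdd char_vocab char_limit) st)

def unique_words_with_chars_alt (q_tokenized : List (List String)) (s_tokenized : List (List String)) (char_vocab : List (String × Int)) (indices : Option (List Int)) (char_limit : Int) : List (List Int) × List Int × List (List Int) × List (List Int) :=
  let idxs := pvEff q_tokenized indices
  let st := idxs.foldl (pvStepB char_vocab char_limit q_tokenized s_tokenized)
      (PySem.Dict.empty, [], [])
  (st.2.1, st.2.2,
   idxs.map (fun j => (PySem.List.pyGetD q_tokenized j []).map
      (fun w => st.1.getD (pvTrunc char_limit w) 0)),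
   idxs.map (fun j => (PySem.List.pyGetD s_tokenized j []).map
      (fun w => st.1.getD (pvTrunc char_limit w) 0)))

-- ===== PRECONDITION & SPEC =====
-- Pre_: every effective index is a valid Python index into both token lists (else A raises IndexError)
def Pre_unique_words_with_chars (q_tokenized : List (List String)) (s_tokenized : List (List String)) (char_vocab : List (String × Int)) (indices : Option (List Int)) (char_limit : Int) : Prop :=
  ∀ j ∈ pvEff q_tokenized indices,
    PySem.Raise.InRange q_tokenized.length j ∧ PySem.Raise.InRange s_tokenized.length j

instance (q_tokenized : List (List String)) (s_tokenized : List (List String)) (char_vocab : List (String × Int)) (indices : Option (List Int)) (char_limit : Int) : Decidable (Pre_unique_words_with_chars q_tokenized s_tokenized char_vocab indices char_limit) := by unfold Pre_unique_words_with_chars; infer_instance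

def pvWitness_unique_words_with_chars : List (List String) × List (List String) × (List (String × Int)) × Option (List Int) × Int :=
  ([["ab", "a"]], [["a", "c"]], [("a", 1)], none, 20)

def Spec_unique_words_with_chars (q_tokenized : List (List String)) (s_tokenized : List (List String)) (char_vocab : List (String × Int)) (indices : Option (List Int)) (char_limit : Int) (out : List (List Int) × List Int × List (List Int) × List (List Int)) : Prop := out = unique_words_with_chars_alt q_tokenized s_tokenized char_vocab indices char_limit
instance (q_tokenized : List (List String)) (s_tokenized : List (List String)) (char_vocab : List (String × Int)) (indices : Option (List Int)) (char_limit : Int) (out : List (List Int) × List Int × List (List Int) × List (List Int)) : Decidable (Spec_unique_words_with_chars q_tokenized s_tokenized char_vocab indices char_limit out) := by unfold Spec_unique_words_with_chars; infer_instance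

-- ===== CLAIM (what is proved, stated in full; the proofs are below) =====
def Claim_equal_unique_words_with_chars : Prop := ∀ (q_tokenized : List (List String)) (s_tokenized : List (List String)) (char_vocab : List (String × Int)) (indices : Option (List Int)) (char_limit : Int), Dom_unique_words_with_chars q_tokenized s_tokenized char_vocab indices char_limit → Pre_unique_words_with_chars q_tokenized s_tokenized char_vocab indices char_limit → Spec_unique_words_with_chars q_tokenized s_tokenized char_vocab indices char_limit (unique_words_with_chars q_tokenized s_tokenized char_vocab indices char_limit)

-- ===== LEMMAS AND PROOFS =====

theorem pv_witness_ok :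
    Dom_unique_words_with_chars (pvWitness_unique_words_with_chars.1) (pvWitness_unique_words_with_chars.2.1) (pvWitness_unique_words_with_chars.2.2.1) (pvWitness_unique_words_with_chars.2.2.2.1) (pvWitness_unique_words_with_chars.2.2.2.2) ∧
    Pre_unique_words_with_chars (pvWitness_unique_words_with_chars.1) (pvWitness_unique_words_with_chars.2.1) (pvWitness_unique_words_with_chars.2.2.1) (pvWitness_unique_words_with_chars.2.2.2.1) (pvWitness_unique_words_with_chars.2.2.2.2) := by
  decide

-- lookups already present are untouched by pvAdd
theorem pv_get?_add {cv : List (String × Int)} {cl : Int}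
    {st : PySem.Dict (List Char) Int × List (List Int) × List Int} {w0 : String}
    {k : List Char} {v : Int} (h : st.1.get? k = some v) :
    (pvAdd cv cl st w0).1.get? k = some v := by
  unfold pvAdd
  by_cases hc : st.1.contains (pvTrunc cl w0) = true
  · simp [hc, h]
  · simp only [Bool.not_eq_true] at hc
    simp only [hc]
    have hne : k ≠ pvTrunc cl w0 := by
      intro he; subst he
      rw [PySem.Dict.contains_eq_isSome_get?, h] at hc; simp at hc
    simp [PySem.Dict.get?_insert_of_ne _ _ hne, h]

theorem pv_get?_foldl_add {cv : List (String × Int)} {cl : Int}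
    (ws : List String)
    {st : PySem.Dict (List Char) Int × List (List Int) × List Int}
    {k : List Char} {v : Int} (h : st.1.get? k = some v) :
    (ws.foldl (pvAdd cv cl) st).1.get? k = some v := by
  induction ws generalizing st with
  | nil => exact h
  | cons w t ih => exact ih (pv_get?_add h)

-- after pvAdd, the (truncated) word is in the table
theorem pv_contains_add_self (cv : List (String × Int)) (cl : Int)
    (st : PySem.Dict (List Char) Int × List (List Int) × List Int) (w0 : String) :
    (pvAdd cv cl st w0).1.contains (pvTrunc cl w0) = true := by
  unfold pvAdd
  by_cases hc : st.1.contains (pvTrunc cl w0) = true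
  · simp [hc]
  · simp only [Bool.not_eq_true] at hc
    simp [hc, PySem.Dict.contains_insert_self]

theorem pv_contains_foldl_of_mem {cv : List (String × Int)} {cl : Int}
    {ws : List String} {w : String} (hw : w ∈ ws)
    (st : PySem.Dict (List Char) Int × List (List Int) × List Int) :
    (ws.foldl (pvAdd cv cl) st).1.contains (pvTrunc cl w) = true := by
  induction ws generalizing st with
  | nil => cases hw
  | cons x t ih =>
    rcases List.mem_cons.mp hw with rfl | h
    · have hc := pv_contains_add_self cv cl st w
      rw [PySem.Dict.contains_eq_isSome_get?] at hc ⊢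
      obtain ⟨v, hv⟩ := Option.isSome_iff_exists.mp hc
      rw [List.foldl_cons, pv_get?_foldl_add t hv]; rfl
    · exact ih h _

-- getD at a contained key is preserved through any later pvAdd fold
theorem pv_getD_foldl_of_contains {cv : List (String × Int)} {cl : Int}
    (ws : List String)
    {st : PySem.Dict (List Char) Int × List (List Int) × List Int}
    {k : List Char} (hc : st.1.contains k = true) :
    (ws.foldl (pvAdd cv cl) st).1.getD k 0 = st.1.getD k 0 := by
  rw [PySem.Dict.contains_eq_isSome_get?] at hc
  obtain ⟨v, hv⟩ := Option.isSome_iff_exists.mp hc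
  rw [PySem.Dict.getD_eq_get?_getD, PySem.Dict.getD_eq_get?_getD, hv,
      pv_get?_foldl_add ws hv]

-- A's row fold = B's phase-1 fold paired with lookups in the row-final table
theorem pv_rowA (cv : List (String × Int)) (cl : Int) (ws : List String)
    (st : PySem.Dict (List Char) Int × List (List Int) × List Int) (acc : List Int) :
    ws.foldl (fun p w => let st' := pvAdd cv cl p.1 w
                         (st', p.2 ++ [st'.1.getD (pvTrunc cl w) 0])) (st, acc)
    = (ws.foldl (pvAdd cv cl) st,
       acc ++ ws.map (fun w => (ws.foldl (pvAdd cv cl) st).1.getD (pvTrunc cl w) 0)) := by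
  induction ws generalizing st acc with
  | nil => simp
  | cons w t ih =>
    simp only [List.foldl_cons, List.map_cons]
    rw [ih]
    have hval : (t.foldl (pvAdd cv cl) (pvAdd cv cl st w)).1.getD (pvTrunc cl w) 0
        = (pvAdd cv cl st w).1.getD (pvTrunc cl w) 0 :=
      pv_getD_foldl_of_contains t (pv_contains_add_self cv cl st w)
    rw [hval]
    simp

-- a map over a row is unchanged when the table only grows afterwards
theorem pv_map_congr_grow {cl : Int}
    {d d' : PySem.Dict (List Char) Int}
    (hsub : ∀ k v, d.get? k = some v → d'.get? k = some v)
    {ws : List String} (hc : ∀ w ∈ ws, d.contains (pvTrunc cl w) = true) :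
    ws.map (fun w => d.getD (pvTrunc cl w) 0) = ws.map (fun w => d'.getD (pvTrunc cl w) 0) := by
  apply List.map_congr_left
  intro w hw
  have h := hc w hw
  rw [PySem.Dict.contains_eq_isSome_get?] at h
  obtain ⟨v, hv⟩ := Option.isSome_iff_exists.mp h
  rw [PySem.Dict.getD_eq_get?_getD, PySem.Dict.getD_eq_get?_getD, hv, hsub _ _ hv]

theorem pv_get?_foldl_stepB {cv : List (String × Int)} {cl : Int}
    {q s : List (List String)} (idxs : List Int)
    {st : PySem.Dict (List Char) Int × List (List Int) × List Int}
    {k : List Char} {v : Int} (h : st.1.get? k = some v) :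
    (idxs.foldl (pvStepB cv cl q s) st).1.get? k = some v := by
  induction idxs generalizing st with
  | nil => exact h
  | cons j t ih =>
    exact ih (pv_get?_foldl_add _ (pv_get?_foldl_add _ h))

-- main invariant: A's outer fold is B's phase-1 fold plus lookups in the final table
theorem pv_outer (cv : List (String × Int)) (cl : Int) (q s : List (List String))
    (idxs : List Int)
    (st : PySem.Dict (List Char) Int × List (List Int) × List Int)
    (qs ss : List (List Int)) :
    idxs.foldl (pvStepA cv cl q s) (st, qs, ss)
    = (idxs.foldl (pvStepB cv cl q s) st,
       qs ++ idxs.map (fun j => (PySem.List.pyGetD q j []).map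
          (fun w => (idxs.foldl (pvStepB cv cl q s) st).1.getD (pvTrunc cl w) 0)),
       ss ++ idxs.map (fun j => (PySem.List.pyGetD s j []).map
          (fun w => (idxs.foldl (pvStepB cv cl q s) st).1.getD (pvTrunc cl w) 0))) := by
  induction idxs generalizing st qs ss with
  | nil => simp
  | cons j t ih =>
    simp only [List.foldl_cons, List.map_cons]
    have hstep : pvStepA cv cl q s (st, qs, ss) j
        = (pvStepB cv cl q s st j,
           qs ++ [(PySem.List.pyGetD q j []).map
              (fun w => ((PySem.List.pyGetD q j []).foldl (pvAdd cv cl) st).1.getD (pvTrunc cl w) 0)],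
           ss ++ [(PySem.List.pyGetD s j []).map
              (fun w => (pvStepB cv cl q s st j).1.getD (pvTrunc cl w) 0)]) := by
      simp only [pvStepA, pvStepB]
      rw [pv_rowA, pv_rowA]
      simp
    rw [hstep, ih]
    -- identify the per-row maps with lookups in the final table
    have hsubq : ∀ k v, ((PySem.List.pyGetD q j []).foldl (pvAdd cv cl) st).1.get? k = some v →
        (t.foldl (pvStepB cv cl q s) (pvStepB cv cl q s st j)).1.get? k = some v := by
      intro k v hv
      exact pv_get?_foldl_stepB t (pv_get?_foldl_add _ hv)
    have hsubs : ∀ k v, (pvStepB cv cl q s st j).1.get? k = some v →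
        (t.foldl (pvStepB cv cl q s) (pvStepB cv cl q s st j)).1.get? k = some v := by
      intro k v hv
      exact pv_get?_foldl_stepB t hv
    have hq : (PySem.List.pyGetD q j []).map
        (fun w => ((PySem.List.pyGetD q j []).foldl (pvAdd cv cl) st).1.getD (pvTrunc cl w) 0)
        = (PySem.List.pyGetD q j []).map
        (fun w => (t.foldl (pvStepB cv cl q s) (pvStepB cv cl q s st j)).1.getD (pvTrunc cl w) 0) :=
      pv_map_congr_grow hsubq (fun w hw => pv_contains_foldl_of_mem hw st)
    have hs : (PySem.List.pyGetD s j []).map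
        (fun w => (pvStepB cv cl q s st j).1.getD (pvTrunc cl w) 0)
        = (PySem.List.pyGetD s j []).map
        (fun w => (t.foldl (pvStepB cv cl q s) (pvStepB cv cl q s st j)).1.getD (pvTrunc cl w) 0) :=
      pv_map_congr_grow hsubs (fun w hw => pv_contains_foldl_of_mem hw _)
    rw [hq, hs]
    simp

-- ===== VERDICT (by name: the statement is the Claim_ definition above) =====
theorem unique_words_with_chars_spec : Claim_equal_unique_words_with_chars := by
  intro q s cv idx cl _ _
  unfold Spec_unique_words_with_chars
  simp only [unique_words_with_chars, unique_words_with_chars_alt]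
  rw [pv_outer]
  simp
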